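-- pv_equiv track=rewrite | github.com/samikoz/pyfun | fun_string.py | repeated_min_distance
-- ===== SOURCE A (Python) =====
-- import itertools
-- import operator
--
-- def indices(char, string):
--     """gets all positions of a char in a string."""
--     return [x-1 for x in itertools.accumulate(
--         len(substr)+1 for substr in string.split(char)[:-1]
--     )]
--
-- def repeated_min_distance(string):
--     """minimal distance between repeated letters or -1."""
--     return min(
--         list(filter(lambda x: x > -1, [
--             min(
--                 list(map(
--                     lambda x: operator.sub(x[1], x[0]), zip(
--                         indices(unique_char, string)[:-1],
--                         indices(unique_char, string)[1:]
--                     )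
--                 )),
--                 default=-1
--             )
--             for unique_char in set(string)
--         ])),
--         default=-1
--     )
-- ===== SOURCE B (Python) =====
-- def repeated_min_distance(string):
--     """minimal distance between repeated letters or -1."""
--     last = {}
--     best = -1
--     for i, c in enumerate(string):
--         if c in last:
--             d = i - last[c]
--             if best == -1 or d < best:
--                 best = d
--         last[c] = i
--     return best
-- ===== Notes on version B (the rewrite author's own statement) =====
-- stated objective: faster
-- what changed: Replaced the per-character split/accumulate index scans over set(string) with one left-to-right pass keeping a dict of each character's last position and the running minimum gap.
import Mathlib
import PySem

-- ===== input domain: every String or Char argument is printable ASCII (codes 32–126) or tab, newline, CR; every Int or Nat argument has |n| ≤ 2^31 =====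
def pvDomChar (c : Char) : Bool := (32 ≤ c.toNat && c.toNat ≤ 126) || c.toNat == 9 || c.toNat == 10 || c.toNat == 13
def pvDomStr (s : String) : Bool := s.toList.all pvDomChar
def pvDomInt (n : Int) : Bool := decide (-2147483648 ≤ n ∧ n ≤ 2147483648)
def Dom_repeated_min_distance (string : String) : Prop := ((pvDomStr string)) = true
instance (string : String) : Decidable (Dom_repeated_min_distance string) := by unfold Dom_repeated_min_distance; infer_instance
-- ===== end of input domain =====

-- B replaces A's per-character split/accumulate index scans by a single left-to-right pass with a
-- dict of last-seen positions and a running minimum gap (objective: faster).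

-- ===== PORT A =====
-- itertools.accumulate over ints, ported by hand step for step (running sums; exact)
def pyAccumulate (acc : Int) : List Int → List Int
  | [] => []
  | x :: xs => (acc + x) :: pyAccumulate (acc + x) xs

-- A's helper 'indices': [x-1 for x in accumulate(len(sub)+1 for sub in string.split(char)[:-1])]
def indicesA (char : Char) (string : List Char) : List Int :=
  (pyAccumulate 0 (((PySem.Chars.splitOn string [char]).dropLast).map
      (fun substr => (substr.length : Int) + 1))).map (fun x => x - 1)

def repeated_min_distance (string : String) : Int :=
  PySem.List.minD
    (((PySem.Set.ofList string.toList).map (fun unique_char =>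
        PySem.List.minD
          (((indicesA unique_char string.toList).dropLast.zip
              ((indicesA unique_char string.toList).drop 1)).map (fun x => x.2 - x.1))
          (fun x => x) (-1))).filter (fun x => decide (x > -1)))
    (fun x => x) (-1)

-- ===== PORT B =====
-- one loop iteration of Source B: dict of last-seen positions, running minimum gap
def bStep (st : PySem.Dict Char Int × Int) (ic : Int × Char) : PySem.Dict Char Int × Int :=
  let best : Int :=
    match st.1.get? ic.2 with
    | some j => if st.2 = -1 ∨ ic.1 - j < st.2 then ic.1 - j else st.2
    | none => st.2
  (st.1.insert ic.2 ic.1, best)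

def repeated_min_distance_alt (string : String) : Int :=
  ((PySem.List.enumerate string.toList 0).foldl bStep (PySem.Dict.empty, -1)).2

-- ===== PRECONDITION & SPEC =====
def Spec_repeated_min_distance (string : String) (out : Int) : Prop := out = repeated_min_distance_alt string
instance (string : String) (out : Int) : Decidable (Spec_repeated_min_distance string out) := by unfold Spec_repeated_min_distance; infer_instance

-- ===== CLAIM (what is proved, stated in full; the proofs are below) =====
def Claim_equal_repeated_min_distance : Prop := ∀ (string : String), Dom_repeated_min_distance string → Spec_repeated_min_distance string (repeated_min_distance string)

-- ===== LEMMAS AND PROOFS =====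

-- positions of char c in a list, structurally
def posNat (c : Char) : List Char → List Nat
  | [] => []
  | x :: xs => if x = c then 0 :: (posNat c xs).map (· + 1) else (posNat c xs).map (· + 1)

-- reference recursion for s.split(c) with a single-char separator
def sp (c : Char) : List Char → List (List Char)
  | [] => [[]]
  | x :: xs => if x = c then [] :: sp c xs else (sp c xs).modifyHead (x :: ·)

-- consecutive differences
def diffsR : List Int → List Int
  | a :: b :: t => (b - a) :: diffsR (b :: t)
  | _ => []

-- the gaps between consecutive occurrences of c in l
def gapsC (c : Char) (l : List Char) : List Int := diffsR ((posNat c l).map (fun n : Nat => (n : Int)))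

-- x is a distance between two consecutive occurrences of some character of l
def Gaps (l : List Char) (x : Int) : Prop := ∃ c, x ∈ gapsC c l

-- r is the minimum of the values satisfying P, with sentinel -1 when there are none
def IsMinOf (P : Int → Prop) (r : Int) : Prop :=
  (r = -1 ∧ ∀ x, ¬ P x) ∨ (P r ∧ ∀ x, P x → r ≤ x)

lemma sp_ne_nil (c : Char) (l : List Char) : sp c l ≠ [] := by
  induction l with
  | nil => simp [sp]
  | cons x xs ih =>
    simp only [sp]; split
    · simp
    · cases h : sp c xs with
      | nil => exact absurd h ih
      | cons a t => simp [List.modifyHead]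

lemma go_eq_sp (c : Char) : ∀ (l : List Char) (fuel : Nat) (cur : List Char) (acc : List (List Char)),
    l.length ≤ fuel →
    PySem.Chars.splitOn.go [c] fuel l cur acc = acc.reverse ++ (sp c l).modifyHead (cur.reverse ++ ·) := by
  intro l
  induction l with
  | nil =>
    intro fuel cur acc _
    cases fuel <;> simp [PySem.Chars.splitOn.go, sp, List.modifyHead]
  | cons x xs ih =>
    intro fuel cur acc hf
    cases fuel with
    | zero => simp at hf
    | succ f =>
      rw [PySem.Chars.splitOn.go]
      by_cases hx : x = c
      · subst hx
        have hpre : List.isPrefixOf [x] (x :: xs) = true := by simp [List.isPrefixOf]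
        simp only [hpre, if_pos, List.length_cons, List.length_nil, List.drop_succ_cons, List.drop_zero]
        rw [ih f [] (cur.reverse :: acc) (by simpa using Nat.le_of_succ_le_succ hf)]
        simp only [sp]
        cases h : sp x xs with
        | nil => exact absurd h (sp_ne_nil x xs)
        | cons a t => simp [List.modifyHead]
      · have hpre : List.isPrefixOf [c] (x :: xs) = false := by
          simp [List.isPrefixOf, Ne.symm hx]
        simp only [hpre]
        rw [if_neg (by simp)]
        rw [ih f (x :: cur) acc (by simpa using Nat.le_of_succ_le_succ hf)]
        simp only [sp, if_neg hx]
        cases h : sp c xs with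
        | nil => exact absurd h (sp_ne_nil c xs)
        | cons a t => simp [List.modifyHead]

lemma splitOn_eq_sp (c : Char) (l : List Char) : PySem.Chars.splitOn l [c] = sp c l := by
  rw [PySem.Chars.splitOn, go_eq_sp c l (l.length + 1) [] [] (by omega)]
  cases h : sp c l with
  | nil => exact absurd h (sp_ne_nil c l)
  | cons a t => simp [List.modifyHead]

lemma accum_eq (c : Char) : ∀ (l : List Char) (a : Int),
    (pyAccumulate a (((sp c l).dropLast).map (fun s => (s.length : Int) + 1))).map (fun x => x - 1)
      = (posNat c l).map (fun n : Nat => a + (n : Int)) := by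
  intro l
  induction l with
  | nil => intro a; simp [sp, posNat, pyAccumulate]
  | cons x xs ih =>
    intro a
    by_cases hx : x = c
    · subst hx
      simp only [sp, posNat, if_pos]
      rw [List.dropLast_cons_of_ne_nil (sp_ne_nil x xs)]
      simp only [List.map_cons, pyAccumulate, List.length_nil, Nat.cast_zero]
      have ih1 := ih (a + 1)
      rw [show a + (0 + 1) = a + 1 by ring, ih1]
      simp only [List.map_map, List.cons.injEq]
      exact ⟨by ring, (List.map_congr_left (fun n _ => by simp; ring)).symm⟩
    · simp only [sp, posNat, if_neg hx]
      cases h : sp c xs with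
      | nil => exact absurd h (sp_ne_nil c xs)
      | cons hd t =>
        cases t with
        | nil =>
          have h2 := ih (a + 1)
          rw [h] at h2
          simp only [List.dropLast_singleton, List.map_nil, pyAccumulate] at h2
          have h0 : posNat c xs = [] := by
            cases hp : posNat c xs with
            | nil => rfl
            | cons u v => rw [hp] at h2; simp at h2
          simp [List.modifyHead, pyAccumulate, h0]
        | cons d t' =>
          have this := ih (a + 1)
          rw [h] at this
          rw [List.dropLast_cons_of_ne_nil (by simp)] at this
          simp only [List.map_cons, pyAccumulate] at this
          simp only [List.modifyHead, List.dropLast_cons_of_ne_nil (by simp : (d :: t') ≠ []),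
            List.map_cons, pyAccumulate, List.length_cons]
          have e : a + (((hd.length + 1 : Nat) : Int) + 1) = a + 1 + ((hd.length : Int) + 1) := by push_cast; ring
          rw [e, this, List.map_map]
          exact (List.map_congr_left (fun n _ => by simp; ring)).symm

lemma indicesA_eq (c : Char) (l : List Char) :
    indicesA c l = (posNat c l).map (fun n : Nat => (n : Int)) := by
  rw [indicesA, splitOn_eq_sp, accum_eq]
  exact List.map_congr_left (fun n _ => by simp)

lemma zipdiff_eq : ∀ v : List Int, ((v.dropLast.zip (v.drop 1)).map (fun x => x.2 - x.1)) = diffsR v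
  | [] => by simp [diffsR]
  | [a] => by simp [diffsR]
  | a :: b :: t => by
    have ih := zipdiff_eq (b :: t)
    simp only [diffsR, List.dropLast_cons_of_ne_nil (by simp : (b :: t) ≠ []), List.drop_succ_cons,
      List.drop_zero, List.zip_cons_cons, List.map_cons] at ih ⊢
    rw [ih]

lemma posNat_pairwise (c : Char) (l : List Char) : (posNat c l).Pairwise (· < ·) := by
  induction l with
  | nil => simp [posNat]
  | cons x xs ih =>
    have hm : ((posNat c xs).map (· + 1)).Pairwise (· < ·) :=
      List.Pairwise.map _ (fun a b h => by omega) ih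
    simp only [posNat]
    split
    · exact List.Pairwise.cons (by simp) hm
    · exact hm

lemma diffsR_pos : ∀ {v : List Int}, v.Pairwise (· < ·) → ∀ {x : Int}, x ∈ diffsR v → 1 ≤ x
  | [], _, _, hx => by simp [diffsR] at hx
  | [a], _, _, hx => by simp [diffsR] at hx
  | a :: b :: t, h, x, hx => by
    simp only [diffsR, List.mem_cons] at hx
    rcases hx with rfl | hx
    · have := List.rel_of_pairwise_cons h (by simp : b ∈ b :: t); omega
    · exact diffsR_pos (List.Pairwise.sublist (by simp) h) hx

lemma gapsC_pos {c : Char} {l : List Char} {x : Int} (hx : x ∈ gapsC c l) : 1 ≤ x :=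
  diffsR_pos (List.Pairwise.map _ (fun a b h => by exact_mod_cast h) (posNat_pairwise c l)) hx

lemma posNat_eq_nil_of_not_mem {c : Char} {l : List Char} (h : c ∉ l) : posNat c l = [] := by
  induction l with
  | nil => rfl
  | cons x xs ih =>
    simp only [List.mem_cons, not_or] at h
    simp [posNat, Ne.symm h.1, ih h.2]

lemma posNat_append (c : Char) (p : List Char) (a : Char) :
    posNat c (p ++ [a]) = posNat c p ++ (if a = c then [p.length] else []) := by
  induction p with
  | nil => by_cases h : a = c <;> simp [posNat, h]
  | cons x xs ih =>
    simp only [List.cons_append, posNat, ih, List.map_append]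
    by_cases h : a = c <;> by_cases h2 : x = c <;> simp [h, h2, List.length_cons]

lemma diffsR_append : ∀ {v : List Int} {m : Int}, v.getLast? = some m → ∀ (n : Int),
    diffsR (v ++ [n]) = diffsR v ++ [n - m]
  | [], m, h, n => by simp at h
  | [a], m, h, n => by simp at h; subst h; simp [diffsR]
  | a :: b :: t, m, h, n => by
    have ih := diffsR_append (v := b :: t) (m := m) (by simpa using h) n
    simp only [List.cons_append, diffsR] at ih ⊢
    rw [ih]

lemma gapsC_mem_imp_mem {c : Char} {l : List Char} {x : Int} (hx : x ∈ gapsC c l) : c ∈ l := by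
  by_contra h
  rw [gapsC, posNat_eq_nil_of_not_mem h] at hx
  simp [diffsR] at hx

lemma IsMinOf_congr {P Q : Int → Prop} (h : ∀ x, P x ↔ Q x) {r : Int} (hr : IsMinOf P r) : IsMinOf Q r := by
  rcases hr with ⟨h1, h2⟩ | ⟨h1, h2⟩
  · exact Or.inl ⟨h1, fun x hx => h2 x ((h x).mpr hx)⟩
  · exact Or.inr ⟨(h r).mp h1, fun x hx => h2 x ((h x).mpr hx)⟩

lemma IsMinOf_unique {P : Int → Prop} {r r' : Int}
    (h : IsMinOf P r) (h' : IsMinOf P r') : r = r' := by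
  rcases h with ⟨h1, h2⟩ | ⟨h1, h2⟩ <;> rcases h' with ⟨h1', h2'⟩ | ⟨h1', h2'⟩
  · omega
  · exact absurd h1' (h2 r')
  · exact absurd h1 (h2' r)
  · exact le_antisymm (h2 r' h1') (h2' r h1)

-- the minimum-with-default of an Int list: either empty, or a member below all members
lemma minD_cases (xs : List Int) :
    (xs = [] ∧ PySem.List.minD xs (fun x => x) (-1) = -1) ∨
    (PySem.List.minD xs (fun x => x) (-1) ∈ xs ∧ ∀ y ∈ xs, PySem.List.minD xs (fun x => x) (-1) ≤ y) := by
  cases h : PySem.List.min? xs (fun x => x) with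
  | none => exact Or.inl ⟨(PySem.List.min?_eq_none_iff xs _).mp h, by simp [PySem.List.minD, h]⟩
  | some m =>
    refine Or.inr ?_
    have hm := PySem.List.min?_mem h
    have hmin := PySem.List.min?_isMin h
    simp only [PySem.List.minD, h, Option.getD_some]
    exact ⟨hm, hmin⟩

lemma A_is (l : List Char) :
    IsMinOf (Gaps l)
      (PySem.List.minD
        (((PySem.Set.ofList l).map (fun c => PySem.List.minD (gapsC c l) (fun x => x) (-1))).filter
          (fun x => decide (x > -1)))
        (fun x => x) (-1)) := by
  set f : Char → Int := fun c => PySem.List.minD (gapsC c l) (fun x => x) (-1) with hf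
  set filt := ((PySem.Set.ofList l).map f).filter (fun x => decide (x > -1)) with hfilt
  -- per-char facts
  have hfc : ∀ c, (gapsC c l = [] ∧ f c = -1) ∨ (f c ∈ gapsC c l ∧ ∀ y ∈ gapsC c l, f c ≤ y) :=
    fun c => minD_cases (gapsC c l)
  have hfpos : ∀ c, gapsC c l ≠ [] → (1 ≤ f c ∧ f c ∈ gapsC c l ∧ ∀ y ∈ gapsC c l, f c ≤ y) := by
    intro c hne
    rcases hfc c with ⟨h1, _⟩ | ⟨h1, h2⟩
    · exact absurd h1 hne
    · exact ⟨gapsC_pos h1, h1, h2⟩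
  rcases minD_cases filt with ⟨h1, h2⟩ | ⟨h1, h2⟩
  · -- empty filtered list: no gaps at all
    rw [h2]
    refine Or.inl ⟨rfl, ?_⟩
    rintro x ⟨c, hx⟩
    have hcl : c ∈ l := gapsC_mem_imp_mem hx
    have hcm : f c ∈ (PySem.Set.ofList l).map f :=
      List.mem_map_of_mem ((PySem.Set.mem_ofList (xs := l) (y := c)).mpr hcl)
    have _hpos := hfpos c (by intro h0; rw [h0] at hx; simp at hx)
    have : f c ∈ filt := by
      rw [hfilt, List.mem_filter]
      exact ⟨hcm, by simp; omega⟩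
    rw [h1] at this; simp at this
  · -- nonempty: the result is some f c with gapsC nonempty
    refine Or.inr ?_
    rw [hfilt, List.mem_filter] at h1
    obtain ⟨hmem, hgt⟩ := h1
    obtain ⟨c, hcl, hfc'⟩ := List.mem_map.mp hmem
    have hne : gapsC c l ≠ [] := by
      intro h0
      rcases hfc c with ⟨_, hv⟩ | ⟨hv, _⟩
      · rw [← hfc', hv] at hgt; simp at hgt
      · rw [h0] at hv; simp at hv
    obtain ⟨_, hin, _⟩ := hfpos c hne
    constructor
    · exact ⟨c, hfc' ▸ hin⟩
    · rintro x ⟨c', hx⟩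
      have hne' : gapsC c' l ≠ [] := by intro h0; rw [h0] at hx; simp at hx
      obtain ⟨hp', hin', hmin'⟩ := hfpos c' hne'
      have hcm' : f c' ∈ filt := by
        rw [hfilt, List.mem_filter]
        refine ⟨List.mem_map_of_mem ((PySem.Set.mem_ofList (xs := l) (y := c')).mpr
          (gapsC_mem_imp_mem hx)), by simp; omega⟩
      exact le_trans (h2 _ hcm') (hmin' x hx)

def InvDict (p : List Char) (d : PySem.Dict Char Int) : Prop :=
  ∀ c, d.get? c = ((posNat c p).getLast?).map (fun n : Nat => (n : Int))

lemma gapsC_append_none {a : Char} {p : List Char} (hq : (posNat a p).getLast? = none) :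
    gapsC a (p ++ [a]) = gapsC a p := by
  have h0 : posNat a p = [] := List.getLast?_eq_none_iff.mp hq
  rw [gapsC, gapsC, posNat_append, if_pos rfl, h0]
  simp [diffsR]

lemma gapsC_append_some {a : Char} {p : List Char} {m : Nat} (hq : (posNat a p).getLast? = some m) :
    gapsC a (p ++ [a]) = gapsC a p ++ [(p.length : Int) - (m : Int)] := by
  rw [gapsC, posNat_append, if_pos rfl, List.map_append]
  have hlast : ((posNat a p).map (fun n : Nat => (n : Int))).getLast? = some ((m : Nat) : Int) := by
    rw [List.getLast?_map, hq]; rfl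
  simp only [List.map_cons, List.map_nil]
  rw [diffsR_append hlast]
  rfl

lemma gapsC_append_ne {c a : Char} (p : List Char) (h : a ≠ c) :
    gapsC c (p ++ [a]) = gapsC c p := by
  rw [gapsC, posNat_append, if_neg h]
  simp [gapsC]

lemma gaps_append (p : List Char) (a : Char) (x : Int) :
    Gaps (p ++ [a]) x ↔
      (Gaps p x ∨ ∃ m : Nat, (posNat a p).getLast? = some m ∧ x = (p.length : Int) - (m : Int)) := by
  constructor
  · rintro ⟨c, hx⟩
    by_cases hca : a = c
    · subst hca
      cases hq : (posNat a p).getLast? with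
      | none => rw [gapsC_append_none hq] at hx; exact Or.inl ⟨a, hx⟩
      | some m =>
        rw [gapsC_append_some hq] at hx
        rcases List.mem_append.mp hx with hx | hx
        · exact Or.inl ⟨a, hx⟩
        · refine Or.inr ⟨m, rfl, ?_⟩
          simpa using hx
    · rw [gapsC_append_ne p hca] at hx
      exact Or.inl ⟨c, hx⟩
  · rintro (⟨c, hx⟩ | ⟨m, hm, hx⟩)
    · by_cases hca : a = c
      · subst hca
        cases hq : (posNat a p).getLast? with
        | none => exact ⟨a, (gapsC_append_none hq) ▸ hx⟩
        | some m => exact ⟨a, by rw [gapsC_append_some hq]; exact List.mem_append_left _ hx⟩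
      · exact ⟨c, by rw [gapsC_append_ne p hca]; exact hx⟩
    · exact ⟨a, by rw [gapsC_append_some hm]; simp [hx]⟩

lemma B_fold (p : List Char) :
    InvDict p ((PySem.List.enumerate p 0).foldl bStep (PySem.Dict.empty, -1)).1 ∧
    IsMinOf (Gaps p) ((PySem.List.enumerate p 0).foldl bStep (PySem.Dict.empty, -1)).2 := by
  induction p using List.reverseRecOn with
  | nil =>
    constructor
    · intro c; simp [PySem.List.enumerate, posNat, pysem]
    · refine Or.inl ⟨by simp [PySem.List.enumerate], ?_⟩
      rintro x ⟨c, hx⟩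
      simp [gapsC, posNat, diffsR] at hx
  | append_singleton p a ih =>
    obtain ⟨ihd, ihm⟩ := ih
    rw [PySem.List.enumerate_append, List.foldl_append]
    set r := (PySem.List.enumerate p 0).foldl bStep (PySem.Dict.empty, -1) with hr
    simp only [PySem.List.enumerate, List.foldl_cons, List.foldl_nil]
    have hga : r.1.get? a = ((posNat a p).getLast?).map (fun n : Nat => (n : Int)) := ihd a
    cases hp : (posNat a p).getLast? with
    | none =>
      -- a unseen: dict gains a ↦ len p, best unchanged
      rw [hp] at hga
      constructor
      · intro c
        simp only [bStep, hga]
        by_cases hca : c = a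
        · subst hca
          rw [PySem.Dict.get?_insert_self, posNat_append, if_pos rfl]
          have hnil : posNat c p = [] := List.getLast?_eq_none_iff.mp hp
          simp [hnil]
        · rw [PySem.Dict.get?_insert_of_ne _ _ hca, ihd c, posNat_append,
            if_neg (fun h => hca h.symm)]
          simp
      · simp only [bStep, hga, Option.map_none]
        refine IsMinOf_congr (fun x => ?_) ihm
        rw [gaps_append]
        constructor
        · exact Or.inl
        · rintro (h | ⟨m, hm, _⟩)
          · exact h
          · rw [hp] at hm; simp at hm
    | some m =>
      rw [hp] at hga
      have hlenp : posNat a p ≠ [] := by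
        intro h0; rw [h0] at hp; simp at hp
      constructor
      · intro c
        simp only [bStep, hga]
        by_cases hca : c = a
        · subst hca
          rw [PySem.Dict.get?_insert_self, posNat_append, if_pos rfl,
            List.getLast?_concat]
          simp
        · rw [PySem.Dict.get?_insert_of_ne _ _ hca, ihd c, posNat_append,
            if_neg (fun h => hca h.symm)]
          simp
      · simp only [bStep, hga, Option.map_some]
        set g : Int := 0 + (p.length : Int) - (m : Int) with hg
        have hgaps : ∀ x, Gaps (p ++ [a]) x ↔ (Gaps p x ∨ x = g) := by
          intro x
          rw [gaps_append]
          constructor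
          · rintro (h | ⟨m', hm', hx⟩)
            · exact Or.inl h
            · rw [hp] at hm'
              refine Or.inr ?_
              obtain rfl : m = m' := by simpa using hm'
              omega
          · rintro (h | hx)
            · exact Or.inl h
            · exact Or.inr ⟨m, hp, by omega⟩
        rcases ihm with ⟨h1, h2⟩ | ⟨h1, h2⟩
        · -- no old gaps: condition true, best' = g
          rw [if_pos (Or.inl h1)]
          refine Or.inr ⟨(hgaps g).mpr (Or.inr rfl), ?_⟩
          intro x hx
          rcases (hgaps x).mp hx with h | h
          · exact absurd h (h2 x)
          · omega
        · -- best is the min of the old gaps; best ≥ 1 so best ≠ -1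
          have hb1 : 1 ≤ r.2 := by
            obtain ⟨c, hc⟩ := h1
            exact gapsC_pos hc
          by_cases hlt : 0 + (p.length : Int) - (m : Int) < r.2
          · rw [if_pos (Or.inr hlt)]
            refine Or.inr ⟨(hgaps g).mpr (Or.inr rfl), ?_⟩
            intro x hx
            rcases (hgaps x).mp hx with h | h
            · have := h2 x h; omega
            · omega
          · rw [if_neg (by omega)]
            refine Or.inr ⟨(hgaps r.2).mpr (Or.inl h1), ?_⟩
            intro x hx
            rcases (hgaps x).mp hx with h | h
            · exact h2 x h
            · omega

-- ===== VERDICT (by name: the statement is the Claim_ definition above) =====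
theorem repeated_min_distance_spec : Claim_equal_repeated_min_distance := by
  intro s _
  unfold Spec_repeated_min_distance repeated_min_distance repeated_min_distance_alt
  have hA := A_is s.toList
  have hB := (B_fold s.toList).2
  have e : ∀ c : Char,
      (((indicesA c s.toList).dropLast.zip ((indicesA c s.toList).drop 1)).map (fun x => x.2 - x.1))
        = gapsC c s.toList := by
    intro c
    rw [zipdiff_eq, indicesA_eq]; rfl
  simp only [e]
  exact IsMinOf_unique hA hB
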